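-- pv_equiv track=rewrite | github.com/PaunovskiD/ai-qa-report-bot | qa_report_bot.py | analyze_report
-- ===== SOURCE A (Python) =====
-- def analyze_report(text):
--     critical = 0
--     minor = 0
--     completed = 0
--     pending = 0
--
--     lines = text.split('\n')
--     for line in lines:
--         if 'critical' in line.lower():
--             critical += 1
--         if 'minor' in line.lower() or 'minor issues' in line.lower():
--             minor += 1
--         if 'completed' in line.lower():
--             completed += 1
--         if 'pending' in line.lower():
--             pending += 1
--
--     return {
--         'critical_bugs': critical,
--         'minor_issues': minor,
--         'completed_tests': completed,
--         'pending_tests': pending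
--     }
-- ===== SOURCE B (Python) =====
-- def analyze_report(text):
--     low = text.lower()
--
--     def lines_with(kw):
--         # Split the whole text by the keyword: there are len(parts)-1 occurrences;
--         # two consecutive occurrences fall on the same line exactly when the part
--         # between them has no newline, so the number of distinct lines containing
--         # kw is 1 + (# interior parts containing '\n'), or 0 with no occurrence.
--         parts = low.split(kw)
--         if len(parts) == 1:
--             return 0
--         return 1 + sum('\n' in p for p in parts[1:-1])
--
--     return {
--         'critical_bugs': lines_with('critical'),
--         'minor_issues': lines_with('minor'),
--         'completed_tests': lines_with('completed'),
--         'pending_tests': lines_with('pending'),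
--     }
-- ===== Notes on version B (the rewrite author's own statement) =====
-- stated objective: alternative
-- what changed: Instead of splitting the text into lines and testing each line for each keyword, B lowers the text once and splits it BY each keyword: the per-line count is 0 with no occurrence, else 1 plus the number of interior split parts that contain a newline; A's redundant second disjunct in the minor test (a longer phrase that contains the keyword itself) is dropped.
import Mathlib
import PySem

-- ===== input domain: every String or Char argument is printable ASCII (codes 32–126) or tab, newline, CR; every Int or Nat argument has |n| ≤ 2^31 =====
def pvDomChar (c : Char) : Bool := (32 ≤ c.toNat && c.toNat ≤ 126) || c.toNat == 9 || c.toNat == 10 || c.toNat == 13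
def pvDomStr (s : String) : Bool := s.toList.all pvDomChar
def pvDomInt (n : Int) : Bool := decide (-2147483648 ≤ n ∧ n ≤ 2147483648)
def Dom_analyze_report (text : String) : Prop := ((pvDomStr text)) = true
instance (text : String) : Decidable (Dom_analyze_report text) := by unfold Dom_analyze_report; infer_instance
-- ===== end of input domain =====

-- B replaces A's line-by-line keyword tests by a different algorithm: it splits the
-- lowered text by each keyword and derives the per-line count from the split parts;
-- same result everywhere (it also drops A's redundant longer-phrase disjunct in the
-- minor test, which is subsumed by the keyword itself).

-- ===== PORT A =====
-- A's loop over the lines, carrying the four counters (critical, minor, completed, pending).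
def analyzeLoop : List (List Char) → Int × Int × Int × Int → Int × Int × Int × Int
  | [], s => s
  | line :: rest, (c, m, co, p) =>
      let c'  := if PySem.Chars.isIn "critical".toList (PySem.Chars.lower line) then c + 1 else c
      let m'  := if PySem.Chars.isIn "minor".toList (PySem.Chars.lower line)
                    || PySem.Chars.isIn "minor issues".toList (PySem.Chars.lower line) then m + 1 else m
      let co' := if PySem.Chars.isIn "completed".toList (PySem.Chars.lower line) then co + 1 else co
      let p'  := if PySem.Chars.isIn "pending".toList (PySem.Chars.lower line) then p + 1 else p
      analyzeLoop rest (c', m', co', p')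

def analyze_report (text : String) : List (String × Int) :=
  let lines := PySem.Chars.splitOn text.toList "\n".toList
  let r := analyzeLoop lines (0, 0, 0, 0)
  [("critical_bugs", r.1), ("minor_issues", r.2.1),
   ("completed_tests", r.2.2.1), ("pending_tests", r.2.2.2)]

-- ===== PORT B =====
-- Source B: low = text.lower(); per keyword: parts = low.split(kw);
-- 0 if len(parts) == 1 else 1 + sum('\n' in p for p in parts[1:-1]).
def analyze_report_alt (text : String) : List (String × Int) :=
  let low := PySem.Chars.lower text.toList
  let linesWith : List Char → Int := fun kw =>
    let parts := PySem.Chars.splitOn low kw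
    if parts.length = 1 then 0
    else 1 + ((PySem.List.slice parts (some 1) (some (-1))).countP
                (fun p => PySem.Chars.isIn "\n".toList p) : Int)
  [("critical_bugs", linesWith "critical".toList),
   ("minor_issues", linesWith "minor".toList),
   ("completed_tests", linesWith "completed".toList),
   ("pending_tests", linesWith "pending".toList)]

-- ===== PRECONDITION & SPEC =====
def Spec_analyze_report (text : String) (out : List (String × Int)) : Prop := out = analyze_report_alt text
instance (text : String) (out : List (String × Int)) : Decidable (Spec_analyze_report text out) := by unfold Spec_analyze_report; infer_instance

-- ===== CLAIM (what is proved, stated in full; the proofs are below) =====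
def Claim_equal_analyze_report : Prop := ∀ (text : String), Dom_analyze_report text → Spec_analyze_report text (analyze_report text)

-- ===== LEMMAS AND PROOFS =====

-- Reference form of Python's split-by-sep (first-match, non-overlapping), recursing
-- one character at a time; for sep ≠ [] it coincides with PySem.Chars.splitOn.
def mySplit (sep : List Char) : List Char → List (List Char)
  | [] => [[]]
  | c :: r =>
      if sep.isPrefixOf (c :: r) then [] :: mySplit sep (r.drop (sep.length - 1))
      else (mySplit sep r).modifyHead (c :: ·)
termination_by t => t.length
decreasing_by
  all_goals simp

-- Fused scanner: walks the text once; b = "the current line was already counted".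
-- It equals A's per-line count (scanA) and B's split-by-keyword formula (scanB).
def scanS (kw : List Char) : List Char → Bool → Int
  | [], _ => 0
  | c :: r, b =>
      if kw.isPrefixOf (c :: r) then
        (if b then 0 else 1) + scanS kw (r.drop (kw.length - 1)) true
      else if c = '\n' then scanS kw r false
      else scanS kw r b
termination_by t _ => t.length
decreasing_by
  all_goals simp

lemma mySplit_ne_nil (sep : List Char) (t : List Char) : mySplit sep t ≠ [] := by
  fun_induction mySplit sep t with
  | case1 => simp
  | case2 => simp
  | case3 c r h ih => cases hm : mySplit sep r with
      | nil => exact absurd hm ih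
      | cons a l => simp

lemma headI_mySplit_prefix (sep : List Char) (t : List Char) :
    (mySplit sep t).headI <+: t := by
  fun_induction mySplit sep t with
  | case1 => simp
  | case2 => simp
  | case3 c r h ih =>
      obtain ⟨a, l, hm⟩ := List.exists_cons_of_ne_nil (mySplit_ne_nil sep r)
      rw [hm] at ih ⊢
      simpa using ih

lemma go_eq (sep : List Char) (hsep : sep ≠ []) :
    ∀ (fuel : Nat) (l cur : List Char) (acc : List (List Char)), l.length < fuel →
      PySem.Chars.splitOn.go sep fuel l cur acc
        = acc.reverse ++ (mySplit sep l).modifyHead (cur.reverse ++ ·) := by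
  obtain ⟨s0, sep', rfl⟩ := List.exists_cons_of_ne_nil hsep
  intro fuel
  induction fuel with
  | zero => intro l cur acc h; omega
  | succ fuel ih =>
      intro l cur acc h
      cases l with
      | nil => simp [PySem.Chars.splitOn.go, mySplit]
      | cons c rest =>
          by_cases hp : (s0 :: sep').isPrefixOf (c :: rest)
          · rw [PySem.Chars.splitOn.go, if_pos hp]
            rw [ih (List.drop (s0 :: sep').length (c :: rest)) [] (cur.reverse :: acc)
                  (by simp at h; simp [List.length_drop]; omega)]
            rw [mySplit, if_pos hp]
            simp [List.drop_succ_cons]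
            cases mySplit (s0 :: sep') (List.drop sep'.length rest) <;> simp
          · rw [PySem.Chars.splitOn.go, if_neg hp]
            rw [ih rest (c :: cur) acc (by simp at h ⊢; omega)]
            rw [mySplit, if_neg hp]
            obtain ⟨a, m, hm⟩ := List.exists_cons_of_ne_nil (mySplit_ne_nil (s0 :: sep') rest)
            simp [hm]

lemma splitOn_eq_mySplit (sep : List Char) (hsep : sep ≠ []) (t : List Char) :
    PySem.Chars.splitOn t sep = mySplit sep t := by
  rw [PySem.Chars.splitOn, go_eq sep hsep (t.length + 1) t [] [] (by omega)]
  obtain ⟨a, m, hm⟩ := List.exists_cons_of_ne_nil (mySplit_ne_nil sep t)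
  simp [hm]

lemma lowerChar_eq_nl (c : Char) : (PySem.Chars.lowerChar c = '\n') ↔ c = '\n' := by
  constructor
  · intro h
    by_cases hu : PySem.Chars.isupper c = true
    · exfalso
      have hA : 'A' ≤ c ∧ c ≤ 'Z' := by simpa [PySem.Chars.isupper] using hu
      have h65 : 65 ≤ c.toNat := hA.1
      have h90 : c.toNat ≤ 90 := hA.2
      have hv : (c.toNat + 32).isValidChar := by left; omega
      have ht : (Char.ofNat (c.toNat + 32)).toNat = c.toNat + 32 := by
        rw [Char.toNat_ofNat]; simp [hv]
      have h10 : (PySem.Chars.lowerChar c).toNat = 10 := by rw [h]; rfl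
      rw [PySem.Chars.lowerChar, if_pos hu] at h10
      omega
    · simp [PySem.Chars.lowerChar, hu] at h; exact h
  · intro h; subst h; decide

lemma mySplit_lower_comm (t : List Char) :
    mySplit ['\n'] (PySem.Chars.lower t) = (mySplit ['\n'] t).map PySem.Chars.lower := by
  induction t with
  | nil => simp [PySem.Chars.lower, mySplit]
  | cons c r ih =>
      have hl : PySem.Chars.lower (c :: r) = PySem.Chars.lowerChar c :: PySem.Chars.lower r := rfl
      by_cases hc : c = '\n'
      · subst hc
        have hlc : PySem.Chars.lowerChar '\n' = '\n' := by decide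
        rw [hl, hlc]
        rw [mySplit, mySplit, if_pos (by simp [List.isPrefixOf]), if_pos (by simp [List.isPrefixOf])]
        simp only [PySem.Chars.lower] at ih
        simp [ih, PySem.Chars.lower]
      · have hlc : PySem.Chars.lowerChar c ≠ '\n' := fun h => hc ((lowerChar_eq_nl c).mp h)
        rw [hl]
        rw [mySplit, mySplit, if_neg (by simp [List.isPrefixOf]; exact fun h => hlc h.symm),
          if_neg (by simp [List.isPrefixOf]; exact fun h => hc h.symm)]
        rw [ih]
        cases hm : mySplit ['\n'] r with
        | nil => exact absurd hm (mySplit_ne_nil _ _)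
        | cons a m => simp [PySem.Chars.lower]

lemma isIn_nl_cons (c : Char) (hc : c ≠ '\n') (p : List Char) :
    PySem.Chars.isIn ['\n'] (c :: p) = PySem.Chars.isIn ['\n'] p := by
  cases h : PySem.Chars.isIn ['\n'] p with
  | true =>
      have hp := (PySem.Chars.isIn_iff_infix ['\n'] p).mp h
      rw [PySem.Chars.isIn_iff_infix]
      exact hp.trans (List.suffix_cons c p).isInfix
  | false =>
      rw [PySem.Chars.isIn_eq_false_iff] at h ⊢
      intro hinf
      rcases List.infix_cons_iff.mp hinf with hpre | hinf'
      · exact hc ((List.cons_prefix_cons.mp hpre).1.symm)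
      · exact h hinf'

lemma isIn_nil_of_ne_nil (kw : List Char) (hkw : kw ≠ []) :
    PySem.Chars.isIn kw [] = false := by
  rw [PySem.Chars.isIn_eq_false_iff]
  intro h
  exact hkw (List.infix_nil.mp h)

lemma scanB (kw : List Char) : ∀ (t : List Char) (b : Bool),
    scanS kw t b =
      if (mySplit kw t).length = 1 then 0
      else if b then (((mySplit kw t).dropLast).countP (fun p => PySem.Chars.isIn ['\n'] p) : Int)
      else 1 + (((mySplit kw t).drop 1).dropLast.countP (fun p => PySem.Chars.isIn ['\n'] p) : Int) := by
  intro t b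
  fun_induction scanS kw t b with
  | case1 b => simp [mySplit]
  | case2 c r b hp ih =>
      rw [ih, mySplit, if_pos hp]
      obtain ⟨a, m, hM⟩ := List.exists_cons_of_ne_nil (mySplit_ne_nil kw (r.drop (kw.length - 1)))
      rw [hM]
      cases m with
      | nil => cases b <;> simp [isIn_nil_of_ne_nil]
      | cons a2 m2 =>
          cases b <;> simp [List.dropLast_cons₂, isIn_nil_of_ne_nil]
  | case3 r b hp ih =>
      rw [ih, mySplit, if_neg hp]
      obtain ⟨a, m, hM⟩ := List.exists_cons_of_ne_nil (mySplit_ne_nil kw r)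
      rw [hM]
      cases m with
      | nil => cases b <;> simp
      | cons a2 m2 =>
          have ha : PySem.Chars.isIn ['\n'] ('\n' :: a) = true := by
            rw [PySem.Chars.isIn_iff_infix]
            exact (List.cons_prefix_cons.mpr ⟨rfl, List.nil_prefix⟩).isInfix
          cases b <;> simp [List.dropLast_cons₂, ha] <;> ring
  | case4 c r b hp hc ih =>
      rw [ih, mySplit, if_neg hp]
      obtain ⟨a, m, hM⟩ := List.exists_cons_of_ne_nil (mySplit_ne_nil kw r)
      rw [hM]
      cases m with
      | nil => cases b <;> simp
      | cons a2 m2 =>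
          cases b <;> simp [List.dropLast_cons₂, List.countP_cons, isIn_nl_cons c hc a]

lemma mySplit_kw_prefix : ∀ (kw t : List Char), '\n' ∉ kw → kw <+: t →
      mySplit ['\n'] t
        = (kw ++ (mySplit ['\n'] (t.drop kw.length)).headI)
            :: (mySplit ['\n'] (t.drop kw.length)).tail := by
  intro kw
  induction kw with
  | nil =>
      intro t _ _
      obtain ⟨a, m, hM⟩ := List.exists_cons_of_ne_nil (mySplit_ne_nil ['\n'] t)
      simp [hM]
  | cons d kw' ih =>
      intro t hnl hpre
      obtain ⟨s, rfl⟩ := hpre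
      have hd : d ≠ '\n' := fun h => hnl (by simp [h])
      have hnl' : '\n' ∉ kw' := fun h => hnl (by simp [h])
      rw [List.cons_append, mySplit, if_neg (by simp [List.isPrefixOf]; exact fun h => hd h.symm)]
      rw [ih (kw' ++ s) hnl' (List.prefix_append kw' s)]
      simp

lemma scanA (kw : List Char) (hkw : kw ≠ []) (hnl : '\n' ∉ kw) :
    ∀ (t : List Char) (b : Bool),
      scanS kw t b =
        (if b then 0 else if PySem.Chars.isIn kw (mySplit ['\n'] t).headI then 1 else 0)
          + (((mySplit ['\n'] t).tail.countP (PySem.Chars.isIn kw)) : Int) := by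
  intro t b
  fun_induction scanS kw t b with
  | case1 b => cases b <;> simp [mySplit, isIn_nil_of_ne_nil kw hkw]
  | case2 c r b hp ih =>
      have hpre : kw <+: c :: r := List.isPrefixOf_iff_prefix.mp hp
      have hdrop : (c :: r).drop kw.length = r.drop (kw.length - 1) := by
        cases kw with
        | nil => exact absurd rfl hkw
        | cons k0 kw' => simp
      rw [ih, mySplit_kw_prefix kw (c :: r) hnl hpre, hdrop]
      have hin : PySem.Chars.isIn kw (kw ++ (mySplit ['\n'] (r.drop (kw.length - 1))).headI) = true := by
        rw [PySem.Chars.isIn_iff_infix]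
        exact (List.prefix_append kw _).isInfix
      cases b <;> simp [hin]
  | case3 r b hp ih =>
      have hsplit : mySplit ['\n'] ('\n' :: r) = [] :: mySplit ['\n'] r := by
        rw [mySplit, if_pos (by simp)]
        simp only [show (['\n'].length : Nat) - 1 = 0 from rfl, List.drop_zero]
      obtain ⟨a, m, hM⟩ := List.exists_cons_of_ne_nil (mySplit_ne_nil ['\n'] r)
      rw [hsplit, ih, hM]
      cases b <;>
        simp [isIn_nil_of_ne_nil kw hkw, List.countP_cons] <;>
        split_ifs <;> try ring
  | case4 c r b hp hc ih =>
      obtain ⟨a, m, hM⟩ := List.exists_cons_of_ne_nil (mySplit_ne_nil ['\n'] r)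
      have hsplit : mySplit ['\n'] (c :: r) = (c :: a) :: m := by
        rw [mySplit, if_neg (by simp [List.isPrefixOf]; exact fun h => hc h.symm), hM]
        simp [List.modifyHead]
      have hnp : ¬ kw <+: c :: r := fun h => hp (List.isPrefixOf_iff_prefix.mpr h)
      have hhead : PySem.Chars.isIn kw (c :: a) = PySem.Chars.isIn kw a := by
        cases hk : PySem.Chars.isIn kw a with
        | true =>
            have := (PySem.Chars.isIn_iff_infix kw a).mp hk
            rw [PySem.Chars.isIn_iff_infix]
            exact this.trans (List.suffix_cons c a).isInfix
        | false =>
            rw [PySem.Chars.isIn_eq_false_iff] at hk ⊢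
            intro hinf
            rcases List.infix_cons_iff.mp hinf with hpre | hinf'
            · have hpa : a <+: r := by
                have := headI_mySplit_prefix ['\n'] r
                rwa [hM, List.headI_cons] at this
              exact hnp (hpre.trans (List.cons_prefix_cons.mpr ⟨rfl, hpa⟩))
            · exact hk hinf'
      rw [hsplit, ih, hM]
      cases b <;> simp [hhead]

lemma slice_one_negone {α : Type} (ps : List α) :
    PySem.List.slice ps (some 1) (some (-1)) = (ps.drop 1).dropLast := by
  rcases ps with _ | ⟨a, l⟩
  · simp [PySem.List.slice, PySem.List.clampIdx]
  · simp [PySem.List.slice, PySem.List.clampIdx, List.dropLast_eq_take]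
    split_ifs <;> omega

-- the central per-keyword fact: A's per-line count = B's split-by-keyword formula
lemma keyCount (kw : List Char) (hkw : kw ≠ []) (hnl : '\n' ∉ kw) (t : List Char) :
    (((PySem.Chars.splitOn t ['\n']).map PySem.Chars.lower).countP (PySem.Chars.isIn kw) : Int)
      = if (PySem.Chars.splitOn (PySem.Chars.lower t) kw).length = 1 then 0
        else 1 + ((((PySem.Chars.splitOn (PySem.Chars.lower t) kw).drop 1).dropLast.countP
                    (fun p => PySem.Chars.isIn ['\n'] p)) : Int) := by
  rw [splitOn_eq_mySplit ['\n'] (by decide) t,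
      splitOn_eq_mySplit kw hkw (PySem.Chars.lower t), ← mySplit_lower_comm t]
  have hA := scanA kw hkw hnl (PySem.Chars.lower t) false
  have hB := scanB kw (PySem.Chars.lower t) false
  obtain ⟨a, m, hM⟩ := List.exists_cons_of_ne_nil (mySplit_ne_nil ['\n'] (PySem.Chars.lower t))
  rw [hM] at hA
  simp only [Bool.false_eq_true, if_false] at hA hB
  rw [← hB, hM]
  rw [hA, List.headI_cons, List.tail_cons, List.countP_cons]
  split_ifs <;> push_cast <;> ring

-- A's 'minor issues' disjunct is redundant: "minor" is an infix of "minor issues".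
lemma minor_or_redundant (s : List Char) :
    (PySem.Chars.isIn "minor".toList s || PySem.Chars.isIn "minor issues".toList s)
      = PySem.Chars.isIn "minor".toList s := by
  cases hm : PySem.Chars.isIn "minor".toList s with
  | true => simp
  | false =>
      have hmi : PySem.Chars.isIn "minor issues".toList s = false := by
        rw [PySem.Chars.isIn_eq_false_iff] at hm ⊢
        exact fun hinf => hm (List.IsInfix.trans (by decide) hinf)
      rw [hmi]; rfl

-- Loop invariant: analyzeLoop adds the four per-keyword counts to the accumulators.
lemma analyzeLoop_eq (ls : List (List Char)) (c m co p : Int) :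
    analyzeLoop ls (c, m, co, p) =
      (c + ((ls.map PySem.Chars.lower).countP (fun l => PySem.Chars.isIn "critical".toList l) : Int),
       m + ((ls.map PySem.Chars.lower).countP (fun l => PySem.Chars.isIn "minor".toList l) : Int),
       co + ((ls.map PySem.Chars.lower).countP (fun l => PySem.Chars.isIn "completed".toList l) : Int),
       p + ((ls.map PySem.Chars.lower).countP (fun l => PySem.Chars.isIn "pending".toList l) : Int)) := by
  induction ls generalizing c m co p with
  | nil => simp [analyzeLoop]
  | cons hd tl ih =>
      simp only [analyzeLoop, minor_or_redundant, ih, List.map_cons, List.countP_cons,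
        Prod.mk.injEq]
      split_ifs <;> refine ⟨?_, ?_, ?_, ?_⟩ <;> push_cast <;> ring

-- ===== VERDICT (by name: the statement is the Claim_ definition above) =====
theorem analyze_report_spec : Claim_equal_analyze_report := by
  intro text _
  show _ = _
  simp only [analyze_report, analyze_report_alt, analyzeLoop_eq, slice_one_negone]
  have h1 := keyCount "critical".toList (by decide) (by decide) text.toList
  have h2 := keyCount "minor".toList (by decide) (by decide) text.toList
  have h3 := keyCount "completed".toList (by decide) (by decide) text.toList
  have h4 := keyCount "pending".toList (by decide) (by decide) text.toList
  simp only [show "\n".toList = ['\n'] from rfl] at *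
  simp only [List.countP_map, List.drop_one] at h1 h2 h3 h4
  simp only [show "critical".toList = ['c','r','i','t','i','c','a','l'] from rfl,
    show "minor".toList = ['m','i','n','o','r'] from rfl,
    show "completed".toList = ['c','o','m','p','l','e','t','e','d'] from rfl,
    show "pending".toList = ['p','e','n','d','i','n','g'] from rfl] at h1 h2 h3 h4
  simp [h1, h2, h3, h4]
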